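-- pv_equiv track=rewrite | github.com/Scuffedwrldwide/dsMaker4Python | dsMaker4python.py | setDocstring
-- ===== SOURCE A (Python) =====
-- TAB = "    " # Change docstring indentation here
--
-- def getArguments(line):
--     args = []
--     size = len(line)
--     word = ''
--     for i in range(size):
--         if line[i] == '(':
--             j = i + 1
--             while j < size and line[j] != ')':
--                 if line[j] != ',' and line[j] != ' ':
--                     word += line[j]
--                 else:
--                     if word != '':
--                         args.append(word)
--                     word = ''
--                 j += 1
--             break
--     if word != '':
--         args.append(word)
--     return args
--
-- def countSpace(line):
--     count = 0
--     for i in range(len(line)):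
--         if line[i] == ' ':
--             count += 1
--         else:
--             break
--     return count
--
-- def setDocstring(line):
--     args = getArguments(line)
--     space = TAB + " " * countSpace(line)
--     docstring = f'{space}"""\n{space}Add Description Here\n\n'
--     for arg in args:
--         docstring += f'{space}:param {arg}: Add Type\n'
--     docstring += f'{space}:return: Add Type\n{space}"""\n'
--     line += f'\n{docstring}'
--     return line
-- ===== SOURCE B (Python) =====
-- TAB = "    "  # Change docstring indentation here
--
-- def setDocstring(line):
--     if '(' in line:
--         inner = line.split('(', 1)[1].split(')', 1)[0]
--         args = [w for w in inner.replace(',', ' ').split(' ') if w]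
--     else:
--         args = []
--     space = TAB + " " * (len(line) - len(line.lstrip(' ')))
--     body = ''.join(f'{space}:param {arg}: Add Type\n' for arg in args)
--     return (line + '\n' + f'{space}"""\n{space}Add Description Here\n\n'
--             + body + f'{space}:return: Add Type\n{space}"""\n')
-- ===== Notes on version B (the rewrite author's own statement) =====
-- stated objective: faster
-- what changed: B replaces the char-by-char index scan with slicing at the first open/close parenthesis plus tokenization via replace/split/filter, computes indentation via lstrip, and builds the parameter block with a join over a comprehension instead of += accumulation.
import Mathlib
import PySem

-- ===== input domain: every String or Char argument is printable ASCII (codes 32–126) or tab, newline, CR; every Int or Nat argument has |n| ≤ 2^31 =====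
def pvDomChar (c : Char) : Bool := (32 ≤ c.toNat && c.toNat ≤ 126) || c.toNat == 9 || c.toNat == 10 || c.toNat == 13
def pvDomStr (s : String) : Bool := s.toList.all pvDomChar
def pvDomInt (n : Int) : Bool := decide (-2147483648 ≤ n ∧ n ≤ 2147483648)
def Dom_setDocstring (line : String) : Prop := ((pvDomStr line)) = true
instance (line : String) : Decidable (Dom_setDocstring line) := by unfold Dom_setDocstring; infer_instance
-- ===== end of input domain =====

-- B replaces A's char-by-char scan with slice-based tokenization, lstrip-style space count and join; measurably faster by constant factor.

-- ===== PORT A =====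
def pvTAB : String := "    "

-- countSpace: count leading ' ' chars, stop at first non-space
def pvCountSpaceA : List Char → Nat
  | [] => 0
  | c :: cs => if c = ' ' then pvCountSpaceA cs + 1 else 0

-- inner while loop of getArguments: until ')' or end, split word on ',' / ' '
def pvInnerA : List Char → List Char → List (List Char) → List (List Char) × List Char
  | [], word, args => (args, word)
  | c :: cs, word, args =>
    if c = ')' then (args, word)
    else if c ≠ ',' ∧ c ≠ ' ' then pvInnerA cs (word ++ [c]) args
    else pvInnerA cs [] (if word = [] then args else args ++ [word])

-- outer for loop: skip until first '(' then run inner loop and break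
def pvOuterA : List Char → List (List Char) × List Char
  | [] => ([], [])
  | c :: cs => if c = '(' then pvInnerA cs [] [] else pvOuterA cs

def pvGetArgumentsA (l : List Char) : List (List Char) :=
  let r := pvOuterA l
  if r.2 = [] then r.1 else r.1 ++ [r.2]

def setDocstring (line : String) : String :=
  let args := pvGetArgumentsA line.toList
  let space := pvTAB ++ String.mk (List.replicate (pvCountSpaceA line.toList) ' ')
  let d0 := space ++ "\"\"\"\n" ++ space ++ "Add Description Here\n\n"
  let d1 := args.foldl (fun d a => d ++ (space ++ ":param " ++ String.mk a ++ ": Add Type\n")) d0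
  let d2 := d1 ++ (space ++ ":return: Add Type\n" ++ space ++ "\"\"\"\n")
  line ++ ("\n" ++ d2)

-- ===== PORT B =====
-- tokenizer: split on ',' or ' ', dropping empty tokens (port of replace/split/filter)
def pvTokB : List Char → List Char → List (List Char)
  | [], cur => if cur = [] then [] else [cur]
  | c :: cs, cur =>
    if c = ',' ∨ c = ' ' then (if cur = [] then pvTokB cs [] else cur :: pvTokB cs [])
    else pvTokB cs (cur ++ [c])

def pvGetArgumentsB (l : List Char) : List (List Char) :=
  if '(' ∈ l then pvTokB (((l.dropWhile (· ≠ '(')).tail).takeWhile (· ≠ ')')) [] else []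

def setDocstring_alt (line : String) : String :=
  let l := line.toList
  let args := pvGetArgumentsB l
  let space := pvTAB ++ String.mk (List.replicate (l.length - (l.dropWhile (· = ' ')).length) ' ')
  let body := String.join (args.map (fun a => space ++ ":param " ++ String.mk a ++ ": Add Type\n"))
  line ++ ("\n" ++ (space ++ "\"\"\"\n" ++ space ++ "Add Description Here\n\n" ++ body
    ++ (space ++ ":return: Add Type\n" ++ space ++ "\"\"\"\n")))

-- ===== PRECONDITION & SPEC =====
def Spec_setDocstring (line : String) (out : String) : Prop := out = setDocstring_alt line
instance (line : String) (out : String) : Decidable (Spec_setDocstring line out) := by unfold Spec_setDocstring; infer_instance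

-- ===== CLAIM (what is proved, stated in full; the proofs are below) =====
def Claim_equal_setDocstring : Prop := ∀ (line : String), Dom_setDocstring line → Spec_setDocstring line (setDocstring line)

-- ===== LEMMAS AND PROOFS =====

theorem pvCountSpace_eq (l : List Char) :
    pvCountSpaceA l = l.length - (l.dropWhile (· = ' ')).length := by
  induction l with
  | nil => rfl
  | cons c cs ih =>
    simp only [pvCountSpaceA, List.dropWhile]
    by_cases h : c = ' ' <;> simp [h, ih, List.length_cons]
    · have := List.length_dropWhile_le (p := (· = ' ')) cs
      omega

def pvFinish (r : List (List Char) × List Char) : List (List Char) :=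
  if r.2 = [] then r.1 else r.1 ++ [r.2]

theorem pvInner_eq (l : List Char) : ∀ (word : List Char) (args : List (List Char)),
    pvFinish (pvInnerA l word args) = args ++ pvTokB (l.takeWhile (· ≠ ')')) word := by
  induction l with
  | nil =>
    intro word args
    simp only [pvInnerA, List.takeWhile_nil, pvTokB, pvFinish]
    by_cases h : word = [] <;> simp [h]
  | cons c cs ih =>
    intro word args
    simp only [pvInnerA, List.takeWhile]
    by_cases hc : c = ')'
    · simp only [hc]
      simp only [pvFinish]
      by_cases h : word = [] <;> simp [pvTokB, h]
    · have hc' : (decide (c ≠ ')')) = true := by simp [hc]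
      simp only [hc', if_neg hc, if_true]
      by_cases hs : c ≠ ',' ∧ c ≠ ' '
      · have : ¬ (c = ',' ∨ c = ' ') := by tauto
        simp [hs, ih, pvTokB, this]
      · have hor : c = ',' ∨ c = ' ' := by tauto
        simp only [if_neg hs, ih, pvTokB, if_pos hor]
        by_cases h : word = [] <;> simp [h]
  termination_by l.length

theorem pvOuter_eq (l : List Char) :
    pvGetArgumentsA l = pvGetArgumentsB l := by
  induction l with
  | nil => rfl
  | cons c cs ih =>
    by_cases hc : c = '('
    · simp only [pvGetArgumentsA, pvOuterA, if_pos hc, pvGetArgumentsB, hc]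
      have := pvInner_eq cs [] []
      simp only [pvFinish] at this
      simp [List.dropWhile, this]
    · simp only [pvGetArgumentsA, pvOuterA, if_neg hc] at *
      simp only [pvGetArgumentsB] at *
      have hmem : ('(' ∈ c :: cs) ↔ ('(' ∈ cs) := by
        rw [List.mem_cons]
        constructor
        · rintro (h1 | h1)
          · exact absurd h1.symm hc
          · exact h1
        · exact Or.inr
      by_cases h : '(' ∈ cs
      · simp only [if_pos h] at ih
        rw [if_pos (hmem.mpr h)]
        have hd : (c :: cs).dropWhile (· ≠ '(') = cs.dropWhile (· ≠ '(') := by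
          simp [List.dropWhile, hc]
        rw [hd]; exact ih
      · rw [if_neg (fun hh => h (hmem.mp hh))]
        rw [if_neg h] at ih
        exact ih

theorem pvFoldl_append_init (L : List String) : ∀ s : String,
    List.foldl (fun r t => r ++ t) s L = s ++ List.foldl (fun r t => r ++ t) "" L := by
  induction L with
  | nil => intro s; simp
  | cons x xs ih =>
    intro s
    simp only [List.foldl_cons]
    rw [ih (s ++ x), ih ("" ++ x)]
    simp [String.append_assoc]

theorem pvFold_join (args : List (List Char)) (f : List Char → String) :
    ∀ (init : String), args.foldl (fun d a => d ++ f a) init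
      = init ++ String.join (args.map f) := by
  induction args with
  | nil => intro init; simp [String.join]
  | cons a as ih =>
    intro init
    simp only [List.foldl, List.map, String.join, List.foldl_cons]
    rw [ih]
    simp only [String.join, List.foldl_cons]
    rw [pvFoldl_append_init (List.map f as) ((("" : String)) ++ f a)]
    simp [String.append_assoc]

-- ===== VERDICT (by name: the statement is the Claim_ definition above) =====
theorem setDocstring_spec : Claim_equal_setDocstring := by
  intro line _
  unfold Spec_setDocstring
  simp only [setDocstring, setDocstring_alt, pvOuter_eq, pvCountSpace_eq, pvFold_join,
    String.append_assoc]
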